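-- pv_equiv track=rewrite | github.com/runxiyu/sjdb-src | weekly.py | combine_parsed_meal_tables
-- ===== SOURCE A (Python) =====
-- from typing import Any, Optional, Iterable, Iterator
--
-- class MealTableShapeError(ValueError):
--     pass
--
-- def zero_list(l: list[Any]) -> list[Any]:
--     return [(zero_list(i) if (isinstance(i, list)) else "") for i in l]
--
-- def equal_shapes(a: list[Any], b: list[Any]) -> bool:
--     return zero_list(a) == zero_list(b)
--
-- def combine_parsed_meal_tables(
--     en: list[list[list[str]]], cn: list[list[list[str]]]
-- ) -> list[list[list[list[str]]]]:
--     if not equal_shapes(cn, en):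
--         raise MealTableShapeError(
--             "Augmented menus not in the same shape",
--             zero_list(en),
--             zero_list(cn),
--             en,
--             cn,
--         )
--
--     c = zero_list(en)
--
--     for j in range(len(en)):
--         for i in range(len(en[j])):
--             for k in range(len(en[j][i])):
--                 c[j][i][k] = {"en": en[j][i][k], "zh": cn[j][i][k]}
--     return c
-- ===== SOURCE B (Python) =====
-- # B: replaces the preallocated zero_list copy + fixed depth-3 index loops with a
-- # single structural recursion that zips the two nested lists (same module-level
-- # shape check and MealTableShapeError kept as-is).
-- from typing import Any
--
--
-- class MealTableShapeError(ValueError):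
--     pass
--
--
-- def zero_list(l: list[Any]) -> list[Any]:
--     return [(zero_list(i) if (isinstance(i, list)) else "") for i in l]
--
--
-- def equal_shapes(a: list[Any], b: list[Any]) -> bool:
--     return zero_list(a) == zero_list(b)
--
--
-- def combine_parsed_meal_tables(
--     en: list[list[list[str]]], cn: list[list[list[str]]]
-- ) -> list[list[list[list[str]]]]:
--     if not equal_shapes(cn, en):
--         raise MealTableShapeError(
--             "Augmented menus not in the same shape",
--             zero_list(en),
--             zero_list(cn),
--             en,
--             cn,
--         )
--
--     def combine(e: Any, c: Any) -> Any:
--         if isinstance(e, list):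
--             return [combine(x, y) for x, y in zip(e, c)]
--         return {"en": e, "zh": c}
--
--     return combine(en, cn)
-- ===== Notes on version B (the rewrite author's own statement) =====
-- stated objective: alternative
-- what changed: Replaces A's zero_list preallocation plus three nested index loops with in-place assignment by a single structural recursion that zips the two nested lists level by level.
import Mathlib
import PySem

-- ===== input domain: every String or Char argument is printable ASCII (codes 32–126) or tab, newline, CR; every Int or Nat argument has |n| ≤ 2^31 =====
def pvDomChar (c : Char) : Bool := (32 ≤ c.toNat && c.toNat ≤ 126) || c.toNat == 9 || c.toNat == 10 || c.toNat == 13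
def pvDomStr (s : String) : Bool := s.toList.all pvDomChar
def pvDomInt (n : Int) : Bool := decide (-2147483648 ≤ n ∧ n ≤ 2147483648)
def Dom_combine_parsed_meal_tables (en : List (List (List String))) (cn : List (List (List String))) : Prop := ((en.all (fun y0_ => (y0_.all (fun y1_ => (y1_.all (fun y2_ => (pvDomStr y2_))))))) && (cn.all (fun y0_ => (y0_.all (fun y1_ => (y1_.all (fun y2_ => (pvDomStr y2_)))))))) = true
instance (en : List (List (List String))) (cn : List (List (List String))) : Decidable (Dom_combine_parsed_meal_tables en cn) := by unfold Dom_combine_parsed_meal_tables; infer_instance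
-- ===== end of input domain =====

-- B replaces A's zero_list preallocation + three nested index loops (mutating c in place)
-- with a single structural zip recursion over the two nested lists; same result, same cost.


-- ===== PORT A =====
-- zero_list, specialised to the three typed depths (the untyped Python recursion,
-- instantiated at List (List (List String)) and below).
def zero1 (l : List String) : List String := l.map (fun _ => "")
def zero2 (l : List (List String)) : List (List String) := l.map zero1
def zero3 (l : List (List (List String))) : List (List (List String)) := l.map zero2

def equal_shapes (a : List (List (List String))) (b : List (List (List String))) : Bool :=
  zero3 a == zero3 b

-- Python's c = zero_list(en) holds string leaves that the loops then overwrite with dicts;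
-- the typed port preallocates the same shape with empty-dict leaves, every one overwritten.
def zero3D (l : List (List (List String))) : List (List (List (List (String × String)))) :=
  l.map (fun r => r.map (fun q => q.map (fun _ => ([] : List (String × String)))))

def combine_parsed_meal_tables (en : List (List (List String))) (cn : List (List (List String))) : List (List (List (List (String × String)))) :=
  if ¬ equal_shapes cn en then []   -- raise MealTableShapeError: excluded by Pre_
  else
    let c := zero3D en
    (PySem.List.pyRange 0 (en.length : Int) 1).foldl (fun c j =>
      c.modify j.toNat (fun cj =>
        (PySem.List.pyRange 0 ((PySem.List.pyGetD en j []).length : Int) 1).foldl (fun cj i =>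
          cj.modify i.toNat (fun cji =>
            (PySem.List.pyRange 0 ((PySem.List.pyGetD (PySem.List.pyGetD en j []) i []).length : Int) 1).foldl (fun cji k =>
              cji.set k.toNat
                [("en", PySem.List.pyGetD (PySem.List.pyGetD (PySem.List.pyGetD en j []) i []) k ""),
                 ("zh", PySem.List.pyGetD (PySem.List.pyGetD (PySem.List.pyGetD cn j []) i []) k "")]) cji)) cj)) c

-- ===== PORT B =====
def combine_parsed_meal_tables_alt (en : List (List (List String))) (cn : List (List (List String))) : List (List (List (List (String × String)))) :=
  if ¬ equal_shapes cn en then []   -- raise MealTableShapeError: excluded by Pre_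
  else
    List.zipWith (fun e c =>
      List.zipWith (fun e c =>
        List.zipWith (fun e c => [("en", e), ("zh", c)]) e c) e c) en cn

-- ===== PRECONDITION & SPEC =====
-- Pre_ = the two nested lists have equal shape; on any other input A raises MealTableShapeError.
def Pre_combine_parsed_meal_tables (en : List (List (List String))) (cn : List (List (List String))) : Prop :=
  en.map (fun r => r.map (fun q => q.map (fun _ => ("" : String))))
    = cn.map (fun r => r.map (fun q => q.map (fun _ => ("" : String))))
instance (en : List (List (List String))) (cn : List (List (List String))) : Decidable (Pre_combine_parsed_meal_tables en cn) := by unfold Pre_combine_parsed_meal_tables; infer_instance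

def pvWitness_combine_parsed_meal_tables : List (List (List String)) × List (List (List String)) :=
  ([[["Beef stew", "Rice"], []], [["Tofu"]]], [[["Niu rou", "Mi fan"], []], [["Dou fu"]]])

def Spec_combine_parsed_meal_tables (en : List (List (List String))) (cn : List (List (List String))) (out : List (List (List (List (String × String))))) : Prop := out = combine_parsed_meal_tables_alt en cn
instance (en : List (List (List String))) (cn : List (List (List String))) (out : List (List (List (List (String × String))))) : Decidable (Spec_combine_parsed_meal_tables en cn out) := by unfold Spec_combine_parsed_meal_tables; infer_instance

-- ===== CLAIM (what is proved, stated in full; the proofs are below) =====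
def Claim_equal_combine_parsed_meal_tables : Prop := ∀ (en : List (List (List String))) (cn : List (List (List String))), Dom_combine_parsed_meal_tables en cn → Pre_combine_parsed_meal_tables en cn → Spec_combine_parsed_meal_tables en cn (combine_parsed_meal_tables en cn)

-- ===== LEMMAS AND PROOFS =====

-- A 'for j in range(n): c[j] = g(j, c[j])' loop (n = len(c), each index touched once, in order)
-- is exactly mapIdx.
theorem foldl_pyRange_modify_aux {α : Type} (F : List α → Int → List α) (g : Int → α → α)
    (hF : ∀ acc j, F acc j = acc.modify j.toNat (g j)) (c : List α) :
    ∀ (m : Nat), m ≤ c.length →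
      (PySem.List.pyRange 0 (m : Int) 1).foldl F c
        = c.mapIdx (fun j x => if j < m then g (j : Int) x else x) := by
  intro m
  induction m with
  | zero =>
    intro _
    rw [show ((0:Nat):Int) = 0 from rfl, PySem.List.pyRange_one_eq_nil le_rfl]
    simp only [List.foldl_nil]
    apply List.ext_getElem (by simp)
    intro j h1 h2
    simp [List.getElem_mapIdx]
  | succ m ih =>
    intro hm
    have hm' : m ≤ c.length := Nat.le_of_succ_le hm
    have : ((m + 1 : Nat) : Int) = (m : Int) + 1 := by push_cast; ring
    rw [this, PySem.List.pyRange_one_succ_right (by positivity), List.foldl_append,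
      ih hm', List.foldl_cons, List.foldl_nil, hF]
    apply List.ext_getElem (by simp)
    intro j h1 h2
    rw [List.getElem_modify]
    simp only [List.getElem_mapIdx, Int.toNat_natCast]
    by_cases hj : m = j
    · subst hj
      simp
    · have : (j < m) ↔ (j < m + 1) := by
        constructor <;> intro h <;> omega
      split_ifs with h1' h2' h2' <;> simp_all

theorem foldl_pyRange_modify {α : Type} (F : List α → Int → List α) (g : Int → α → α)
    (hF : ∀ acc j, F acc j = acc.modify j.toNat (g j)) (c : List α) (n : Int)
    (hn : n = (c.length : Int)) :
    (PySem.List.pyRange 0 n 1).foldl F c = c.mapIdx (fun j x => g (j : Int) x) := by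
  subst hn
  rw [foldl_pyRange_modify_aux F g hF c c.length le_rfl]
  apply List.ext_getElem (by simp)
  intro j h1 h2
  simp only [List.getElem_mapIdx] at *
  rw [if_pos]
  simpa using h1

-- the innermost 'c[k] = v(k)' variant (set instead of modify)
theorem foldl_pyRange_set {α : Type} (F : List α → Int → List α) (v : Int → α)
    (hF : ∀ acc j, F acc j = acc.set j.toNat (v j)) (c : List α) (n : Int)
    (hn : n = (c.length : Int)) :
    (PySem.List.pyRange 0 n 1).foldl F c = c.mapIdx (fun j _ => v (j : Int)) := by
  apply foldl_pyRange_modify F (fun j _ => v j) _ c n hn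
  intro acc j
  rw [hF, List.set_eq_modify]

-- shape extraction from Pre_
theorem map_eq_len {α γ : Type} (f g : α → γ) {a b : List α} (h : a.map f = b.map g) :
    a.length = b.length := by
  have := congrArg List.length h
  simpa using this

theorem map_eq_get {α γ : Type} (f g : α → γ) {a b : List α} (h : a.map f = b.map g)
    (j : Nat) (hj : j < a.length) (hj' : j < b.length) : f a[j] = g b[j] := by
  have := congrArg (fun l => l[j]?) h
  simpa [List.getElem?_map, List.getElem?_eq_getElem, hj, hj'] using this

theorem pre_iff_guard (en cn : List (List (List String))) :
    Pre_combine_parsed_meal_tables en cn ↔ equal_shapes cn en = true := by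
  unfold Pre_combine_parsed_meal_tables equal_shapes zero3 zero2 zero1
  rw [beq_iff_eq]
  exact ⟨fun h => h.symm, fun h => h.symm⟩

-- ===== VERDICT (by name: the statement is the Claim_ definition above) =====
theorem combine_parsed_meal_tables_spec : Claim_equal_combine_parsed_meal_tables := by
  intro en cn _ hpre
  unfold Spec_combine_parsed_meal_tables combine_parsed_meal_tables combine_parsed_meal_tables_alt
  rw [(pre_iff_guard en cn).mp hpre]
  simp only [not_false_iff, if_neg, not_true]
  have hlen : en.length = cn.length := map_eq_len _ _ hpre
  rw [foldl_pyRange_modify _ _ (fun _ _ => rfl) _ _ (by simp [zero3D])]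
  apply List.ext_getElem (by simp [zero3D, hlen])
  intro j h1 h2
  have hj : j < en.length := by simpa [zero3D] using h1
  have hj' : j < cn.length := hlen ▸ hj
  simp only [List.getElem_mapIdx, List.getElem_zipWith, zero3D, List.getElem_map]
  simp only [PySem.List.pyGetD_eq_getElem en (i := (j:Int)) [] (by positivity) (by exact_mod_cast hj),
      PySem.List.pyGetD_eq_getElem cn (i := (j:Int)) [] (by positivity) (by exact_mod_cast hj'),
      Int.toNat_natCast]
  have hpre2 := map_eq_get _ _ hpre j hj hj'
  have hlen2 : en[j].length = cn[j].length := map_eq_len _ _ hpre2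
  rw [foldl_pyRange_modify _ _ (fun _ _ => rfl) _ _ (by simp)]
  apply List.ext_getElem (by simp [hlen2])
  intro i hi1 hi2
  have hi : i < en[j].length := by simpa using hi1
  have hi' : i < cn[j].length := hlen2 ▸ hi
  simp only [List.getElem_mapIdx, List.getElem_zipWith, List.getElem_map]
  simp only [PySem.List.pyGetD_eq_getElem en[j] (i := (i:Int)) [] (by positivity) (by exact_mod_cast hi),
      PySem.List.pyGetD_eq_getElem cn[j] (i := (i:Int)) [] (by positivity) (by exact_mod_cast hi'),
      Int.toNat_natCast]
  have hpre3 := map_eq_get _ _ hpre2 i hi hi'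
  have hlen3 : en[j][i].length = cn[j][i].length := map_eq_len _ _ hpre3
  rw [foldl_pyRange_set _ _ (fun _ _ => rfl) _ _ (by simp)]
  apply List.ext_getElem (by simp [hlen3])
  intro k hk1 hk2
  have hk : k < en[j][i].length := by simpa using hk1
  have hk' : k < cn[j][i].length := hlen3 ▸ hk
  simp only [List.getElem_mapIdx, List.getElem_zipWith]
  simp only [PySem.List.pyGetD_eq_getElem en[j][i] (i := (k:Int)) "" (by positivity) (by exact_mod_cast hk),
      PySem.List.pyGetD_eq_getElem cn[j][i] (i := (k:Int)) "" (by positivity) (by exact_mod_cast hk'),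
      Int.toNat_natCast]
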